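-- pv_equiv track=rewrite | github.com/PdxCodeGuild/class_iguana | Code/Daniel/python/lab26-adventure.py | dark_view
-- ===== SOURCE A (Python) =====
-- import copy
--
-- def dark_view(player_pos, lvl1):
--     x, y = player_pos
--     room_state = copy.deepcopy(lvl1)
--
--     for i, row in enumerate(room_state):
--         for j in range(len(row)):
--             if j == len(row)-1:
--                 continue
--             elif i not in range(y-1, y+2):
--                 room_state[i][j] = '   '
--             else:
--                 if j not in range(x-1, x+2):
--                     room_state[i][j] = '   '
--
--     return room_state
-- ===== SOURCE B (Python) =====
-- def dark_view(player_pos, lvl1):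
--     x, y = player_pos
--
--     def hidden_row(row):
--         n = len(row)
--         return ['   '] * (n - 1) + [row[n - 1]] if n else []
--
--     def visible_row(row):
--         n = len(row)
--         if n == 0:
--             return []
--         a = min(max(x - 1, 0), n - 1)
--         b = min(max(x + 2, 0), n - 1)
--         return ['   '] * a + row[a:b] + ['   '] * (n - 1 - b) + [row[n - 1]]
--
--     return [visible_row(r) if y - 1 <= i <= y + 1 else hidden_row(r)
--             for i, r in enumerate(lvl1)]
-- ===== Notes on version B (the rewrite author's own statement) =====
-- stated objective: alternative
-- what changed: Instead of deep-copying the grid and testing every cell's index against range memberships, B assembles each output row by slice concatenation: a hidden row is blanks plus the last cell, a visible row is blank-prefix + the clamped slice row[a:b] + blank-suffix + last cell, with no per-cell branch.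
import Mathlib
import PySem

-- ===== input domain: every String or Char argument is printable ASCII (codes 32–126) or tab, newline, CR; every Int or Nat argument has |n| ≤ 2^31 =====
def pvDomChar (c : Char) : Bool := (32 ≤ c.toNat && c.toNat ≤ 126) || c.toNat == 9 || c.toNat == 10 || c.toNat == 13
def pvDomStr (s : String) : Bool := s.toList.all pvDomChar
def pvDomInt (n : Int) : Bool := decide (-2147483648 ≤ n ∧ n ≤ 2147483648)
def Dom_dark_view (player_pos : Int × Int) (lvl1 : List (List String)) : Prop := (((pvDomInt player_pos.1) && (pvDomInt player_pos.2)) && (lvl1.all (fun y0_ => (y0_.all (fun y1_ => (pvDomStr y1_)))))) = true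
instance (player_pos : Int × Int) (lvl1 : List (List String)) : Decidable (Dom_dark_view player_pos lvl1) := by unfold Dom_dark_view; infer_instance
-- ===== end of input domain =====

-- A deep-copies the grid and blanks every cell whose indices fail the range-membership tests;
-- B assembles each row by slice concatenation (blank prefix + visible slice + blank suffix + last cell).
-- Equal return value; A only mutates its own deep copy, so no caller-visible side effect differs.

-- ===== PORT A =====
-- literal transliteration of A: each (i,j) iteration only rewrites cell (i,j), so the
-- two mutating loops are ported as maps over enumerate with the same branch order.
def dark_view (player_pos : Int × Int) (lvl1 : List (List String)) : List (List String) :=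
  let x := player_pos.1
  let y := player_pos.2
  (PySem.List.enumerate lvl1 0).map (fun ir =>
    let i := ir.1
    let row := ir.2
    (PySem.List.enumerate row 0).map (fun jc =>
      let j := jc.1
      let c := jc.2
      if j = (row.length : Int) - 1 then c
      else if ¬ (i ∈ PySem.List.pyRange (y - 1) (y + 2) 1) then "   "
      else if ¬ (j ∈ PySem.List.pyRange (x - 1) (x + 2) 1) then "   "
      else c))

-- ===== PORT B =====
-- ['   '] * k  →  List.replicate k "   ";  row[a:b]  →  PySem.List.slice (a, b here are clamped nonnegative)
def pvHiddenRow (row : List String) : List String :=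
  if row.length ≠ 0 then
    List.replicate (row.length - 1) "   " ++ [row.getD (row.length - 1) ""]
  else []

def pvVisibleRow (x : Int) (row : List String) : List String :=
  let n := row.length
  if n = 0 then []
  else
    let a := min (max (x - 1) 0) ((n : Int) - 1)
    let b := min (max (x + 2) 0) ((n : Int) - 1)
    List.replicate a.toNat "   " ++ PySem.List.slice row (some a) (some b) ++
      List.replicate (n - 1 - b.toNat) "   " ++ [row.getD (n - 1) ""]

def dark_view_alt (player_pos : Int × Int) (lvl1 : List (List String)) : List (List String) :=
  let x := player_pos.1
  let y := player_pos.2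
  (PySem.List.enumerate lvl1 0).map (fun ir =>
    if y - 1 ≤ ir.1 ∧ ir.1 ≤ y + 1 then pvVisibleRow x ir.2 else pvHiddenRow ir.2)

-- ===== PRECONDITION & SPEC =====
def Spec_dark_view (player_pos : Int × Int) (lvl1 : List (List String)) (out : List (List String)) : Prop := out = dark_view_alt player_pos lvl1
instance (player_pos : Int × Int) (lvl1 : List (List String)) (out : List (List String)) : Decidable (Spec_dark_view player_pos lvl1 out) := by unfold Spec_dark_view; infer_instance

-- ===== CLAIM (what is proved, stated in full; the proofs are below) =====
def Claim_equal_dark_view : Prop := ∀ (player_pos : Int × Int) (lvl1 : List (List String)), Dom_dark_view player_pos lvl1 → Spec_dark_view player_pos lvl1 (dark_view player_pos lvl1)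

-- ===== LEMMAS AND PROOFS =====

-- A's per-cell row as a function of the cell index
theorem aRow_getElem? (x y i : Int) (row : List String) (k : Nat) (hk : k < row.length) :
    ((PySem.List.enumerate row 0).map (fun jc =>
      if jc.1 = (row.length : Int) - 1 then jc.2
      else if ¬ (i ∈ PySem.List.pyRange (y - 1) (y + 2) 1) then "   "
      else if ¬ (jc.1 ∈ PySem.List.pyRange (x - 1) (x + 2) 1) then "   "
      else jc.2))[k]? = some (
      if (k : Int) = (row.length : Int) - 1 then row[k]
      else if ¬ (i ∈ PySem.List.pyRange (y - 1) (y + 2) 1) then "   "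
      else if ¬ ((k : Int) ∈ PySem.List.pyRange (x - 1) (x + 2) 1) then "   "
      else row[k]) := by
  rw [List.getElem?_map, PySem.List.getElem?_enumerate]
  simp [List.getElem?_eq_getElem hk]

theorem hidden_row_eq (x y i : Int) (row : List String)
    (hi : ¬ (y - 1 ≤ i ∧ i ≤ y + 1)) :
    (PySem.List.enumerate row 0).map (fun jc =>
      if jc.1 = (row.length : Int) - 1 then jc.2
      else if ¬ (i ∈ PySem.List.pyRange (y - 1) (y + 2) 1) then "   "
      else if ¬ (jc.1 ∈ PySem.List.pyRange (x - 1) (x + 2) 1) then "   "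
      else jc.2) = pvHiddenRow row := by
  have hiy : ¬ (i ∈ PySem.List.pyRange (y - 1) (y + 2) 1) := by
    rw [PySem.List.mem_pyRange_one]; omega
  apply List.ext_getElem?
  intro k
  by_cases hk : k < row.length
  · have hn : row.length ≠ 0 := by omega
    rw [aRow_getElem? x y i row k hk]
    unfold pvHiddenRow
    rw [if_pos hn, List.getElem?_append]
    by_cases hlast : k = row.length - 1
    · have h2 : (k : Int) = (row.length : Int) - 1 := by omega
      have hkl : ¬ k < row.length - 1 := by omega
      have h3 : k - (row.length - 1) = 0 := by omega
      have hgd : row[row.length - 1]?.getD "" = row[k] := by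
        rw [← hlast]; simp [List.getElem?_eq_getElem hk]
      simp [h2, hkl, h3, hgd]
    · have hkl : k < row.length - 1 := by omega
      have h2 : ¬ ((k : Int) = (row.length : Int) - 1) := by omega
      simp [h2, hiy, hkl]
  · rw [List.getElem?_eq_none, List.getElem?_eq_none]
    · unfold pvHiddenRow
      split <;> (simp; try omega)
    · simp [PySem.List.length_enumerate]; omega

theorem visible_row_eq (x y i : Int) (row : List String)
    (hi : y - 1 ≤ i ∧ i ≤ y + 1) :
    (PySem.List.enumerate row 0).map (fun jc =>
      if jc.1 = (row.length : Int) - 1 then jc.2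
      else if ¬ (i ∈ PySem.List.pyRange (y - 1) (y + 2) 1) then "   "
      else if ¬ (jc.1 ∈ PySem.List.pyRange (x - 1) (x + 2) 1) then "   "
      else jc.2) = pvVisibleRow x row := by
  have hiy : i ∈ PySem.List.pyRange (y - 1) (y + 2) 1 := by
    rw [PySem.List.mem_pyRange_one]; omega
  apply List.ext_getElem?
  intro k
  unfold pvVisibleRow
  by_cases hn : row.length = 0
  · rw [if_pos hn]
    rw [List.getElem?_eq_none, List.getElem?_eq_none]
    · simp
    · simp [PySem.List.length_enumerate]; omega
  rw [if_neg hn]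
  set n := row.length with hnn
  set a : Int := min (max (x - 1) 0) ((n : Int) - 1) with ha
  set b : Int := min (max (x + 2) 0) ((n : Int) - 1) with hb
  have ha0 : 0 ≤ a := by omega
  have hb0 : 0 ≤ b := by omega
  have hab : a ≤ b := by omega
  have hslice : PySem.List.slice row (some a) (some b) = (row.drop a.toNat).take (b.toNat - a.toNat) := by
    exact PySem.List.slice_toNat row ha0 hb0
  have hslen : (PySem.List.slice row (some a) (some b)).length = b.toNat - a.toNat := by
    rw [hslice]; simp; omega
  by_cases hk : k < n
  · rw [aRow_getElem? x y i row k hk, List.append_assoc, List.append_assoc]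
    by_cases h1 : k < a.toNat
    · rw [List.getElem?_append_left (by simpa using h1)]
      have hx1 : ¬ ((k : Int) = (n : Int) - 1) := by omega
      have hx2 : ¬ ((k : Int) ∈ PySem.List.pyRange (x - 1) (x + 2) 1) := by
        rw [PySem.List.mem_pyRange_one]; omega
      simp [← hnn, hx1, hiy, hx2, h1]
    · have h1' : (List.replicate a.toNat ("   " : String)).length ≤ k := by simp; omega
      rw [List.getElem?_append_right h1', List.length_replicate]
      by_cases h2 : k < b.toNat
      · have hq : k - a.toNat < (PySem.List.slice row (some a) (some b)).length := by
          rw [hslen]; omega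
        rw [List.getElem?_append_left hq, hslice]
        have hlt : k - a.toNat < b.toNat - a.toNat := by omega
        rw [List.getElem?_take_of_lt hlt, List.getElem?_drop]
        have hd : a.toNat + (k - a.toNat) = k := by omega
        rw [hd, List.getElem?_eq_getElem hk]
        by_cases hlast : (k : Int) = (n : Int) - 1
        · simp [← hnn, hlast]
        · have hx2 : (k : Int) ∈ PySem.List.pyRange (x - 1) (x + 2) 1 := by
            rw [PySem.List.mem_pyRange_one]; omega
          simp [← hnn, hlast, hiy, hx2]
      · have hq : (PySem.List.slice row (some a) (some b)).length ≤ k - a.toNat := by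
          rw [hslen]; omega
        rw [List.getElem?_append_right hq, hslen]
        by_cases h3 : k < n - 1
        · have hr : k - a.toNat - (b.toNat - a.toNat) <
              (List.replicate (n - 1 - b.toNat) ("   " : String)).length := by
            simp; omega
          rw [List.getElem?_append_left hr]
          have hx1 : ¬ ((k : Int) = (n : Int) - 1) := by omega
          have hx2 : ¬ ((k : Int) ∈ PySem.List.pyRange (x - 1) (x + 2) 1) := by
            rw [PySem.List.mem_pyRange_one]; omega
          have hkr : k - a.toNat - (b.toNat - a.toNat) < n - 1 - b.toNat := by omega
          simp [← hnn, hx1, hiy, hx2, hkr]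
        · have hr : (List.replicate (n - 1 - b.toNat) ("   " : String)).length ≤
              k - a.toNat - (b.toNat - a.toNat) := by
            simp; omega
          rw [List.getElem?_append_right hr, List.length_replicate]
          have h0 : k - a.toNat - (b.toNat - a.toNat) - (n - 1 - b.toNat) = 0 := by omega
          rw [h0]
          have hx1 : (k : Int) = (n : Int) - 1 := by omega
          have hke : n - 1 = k := by omega
          simp only [← hnn, hx1, if_pos]
          simp only [hke]
          simp [List.getElem?_eq_getElem hk]
  · rw [List.getElem?_eq_none, List.getElem?_eq_none]
    · rw [List.length_append, List.length_append, List.length_append, hslen]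
      simp; omega
    · simp [PySem.List.length_enumerate]; omega

-- ===== VERDICT (by name: the statement is the Claim_ definition above) =====
theorem dark_view_spec : Claim_equal_dark_view := by
  intro player_pos lvl1 _
  unfold Spec_dark_view dark_view dark_view_alt
  simp only []
  apply List.map_congr_left
  intro ir _
  by_cases hi : player_pos.2 - 1 ≤ ir.1 ∧ ir.1 ≤ player_pos.2 + 1
  · rw [if_pos hi]
    exact visible_row_eq player_pos.1 player_pos.2 ir.1 ir.2 hi
  · rw [if_neg hi]
    exact hidden_row_eq player_pos.1 player_pos.2 ir.1 ir.2 hi
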